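-- pv_equiv track=rewrite | github.com/bhoomeendra/Judgement-similrity-contrastive-learning | src/data/merge_break_para.py | merge_paras
-- ===== SOURCE A (Python) =====
-- def merge_paras(para_list,limit):
--
--     lengths = [len(para.split(' ')) for para in para_list]
--     pointer_one = 0
--     pointer_two = 0
--     temp_limit = 0
--     new_paras = []
--
--     while(pointer_one<len(lengths)):
--         if lengths[pointer_one] < limit:
--             pointer_two =pointer_one
--             total = lengths[pointer_two]
--             temp_para = ''
--
--             while(pointer_two<len(lengths) and total < limit):
--                 temp_para += para_list[pointer_two] + ' '
--                 pointer_two+=1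
--                 if pointer_two ==len(lengths):
--                     break
--                 total += lengths[pointer_two]
--
--
--             pointer_one = pointer_two
--             new_paras.append(temp_para.strip())
--         else:
--             new_paras.append(para_list[pointer_one])
--             pointer_one+=1
--
--     return new_paras
-- ===== SOURCE B (Python) =====
-- def _groups(lengths, limit):
--     """Partition indices into greedy groups: (start, end, merged?)."""
--     n = len(lengths)
--     groups = []
--     i = 0
--     while i < n:
--         if lengths[i] < limit:
--             j = i
--             s = 0
--             while j < n and s + lengths[j] < limit:
--                 s += lengths[j]
--                 j += 1
--             groups.append((i, j, True))
--             i = j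
--         else:
--             groups.append((i, i + 1, False))
--             i += 1
--     return groups
--
-- def _render(para_list, group):
--     i, j, merged = group
--     if merged:
--         return ' '.join(para_list[i:j]).strip()
--     return para_list[i]
--
-- def merge_paras(para_list, limit):
--     lengths = [len(p.split(' ')) for p in para_list]
--     return [_render(para_list, g) for g in _groups(lengths, limit)]
-- ===== Notes on version B (the rewrite author's own statement) =====
-- stated objective: faster
-- what changed: Replaces A's fused two-pointer loop with += string accumulation by a two-pass build-the-partition-then-render scheme: one scan computes (start, end, merged) groups via a running prefix sum, then a map renders each group with ' '.join(slice).strip() or the raw paragraph.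
import Mathlib
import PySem

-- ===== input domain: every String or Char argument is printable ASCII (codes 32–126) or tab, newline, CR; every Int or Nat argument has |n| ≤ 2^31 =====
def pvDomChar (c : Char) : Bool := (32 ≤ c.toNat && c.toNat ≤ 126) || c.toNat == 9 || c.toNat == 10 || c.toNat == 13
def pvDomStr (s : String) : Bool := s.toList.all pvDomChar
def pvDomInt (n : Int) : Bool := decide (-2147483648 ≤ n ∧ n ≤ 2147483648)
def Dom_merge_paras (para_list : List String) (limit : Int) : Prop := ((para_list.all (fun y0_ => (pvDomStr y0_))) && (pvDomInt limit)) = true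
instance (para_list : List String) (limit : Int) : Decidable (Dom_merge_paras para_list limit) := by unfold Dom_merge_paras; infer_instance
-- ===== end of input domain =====

-- B builds the greedy partition as (start, end, merged) groups, then renders each group; same value as A's fused two-pointer += scan.


-- ===== PORT A =====
-- inner while: temp_para += para_list[j] + ' '; j += 1; break at end of list; total += lengths[j].
-- The growing string is carried as List Char (turned back into String when appended) — exact.
-- The loop advances j by 1 each pass and stops at j = L.length, so fuel = L.length never runs out.
def mpInnerA (P : List String) (L : List Int) (lim : Int) :
    Nat → Nat → Int → List Char → Nat × List Char
  | 0, j, _total, temp => (j, temp)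
  | fuel + 1, j, total, temp =>
    if j < L.length ∧ total < lim then
      let temp' := temp ++ (P.getD j "").toList ++ [' ']
      if j + 1 = L.length then (j + 1, temp')
      else mpInnerA P L lim fuel (j + 1) (total + L.getD (j + 1) 0) temp'
    else (j, temp)

-- outer while over pointer_one (i); i advances by ≥ 1 each pass, so fuel = L.length never runs out
def mpOuterA (P : List String) (L : List Int) (lim : Int) :
    Nat → Nat → List String → List String
  | 0, _i, acc => acc
  | fuel + 1, i, acc =>
    if i < L.length then
      if L.getD i 0 < lim then
        let r := mpInnerA P L lim L.length i (L.getD i 0) []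
        mpOuterA P L lim fuel r.1 (acc ++ [String.ofList (PySem.Chars.strip r.2)])
      else
        mpOuterA P L lim fuel (i + 1) (acc ++ [P.getD i ""])
    else acc

def merge_paras (para_list : List String) (limit : Int) : List String :=
  let lengths := para_list.map (fun para => ((PySem.Chars.splitOn para.toList [' ']).length : Int))
  mpOuterA para_list lengths limit lengths.length 0 []

-- ===== PORT B =====
-- _groups inner while: while j < n and s + lengths[j] < limit: s += lengths[j]; j += 1
-- (j advances by 1 each pass and stops at j = L.length, so fuel = L.length never runs out)
def mpEndB (L : List Int) (lim : Int) : Nat → Nat → Int → Nat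
  | 0, j, _s => j
  | fuel + 1, j, s =>
    if j < L.length ∧ s + L.getD j 0 < lim then mpEndB L lim fuel (j + 1) (s + L.getD j 0)
    else j

-- _groups outer loop (i advances by ≥ 1 each pass, so fuel = L.length never runs out)
def mpGroupsB (L : List Int) (lim : Int) : Nat → Nat → List (Nat × Nat × Bool)
  | 0, _i => []
  | fuel + 1, i =>
    if i < L.length then
      if L.getD i 0 < lim then
        (i, mpEndB L lim L.length i 0, true) :: mpGroupsB L lim fuel (mpEndB L lim L.length i 0)
      else
        (i, i + 1, false) :: mpGroupsB L lim fuel (i + 1)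
    else []

-- _render
def mpRenderB (P : List String) (g : Nat × Nat × Bool) : String :=
  if g.2.2 then
    PySem.Str.strip (PySem.Str.join " " (PySem.List.slice P (some (g.1 : Int)) (some (g.2.1 : Int))))
  else P.getD g.1 ""

def merge_paras_alt (para_list : List String) (limit : Int) : List String :=
  let lengths := para_list.map (fun p => ((PySem.Chars.splitOn p.toList [' ']).length : Int))
  (mpGroupsB lengths limit lengths.length 0).map (mpRenderB para_list)

-- ===== PRECONDITION & SPEC =====
def Spec_merge_paras (para_list : List String) (limit : Int) (out : List String) : Prop := out = merge_paras_alt para_list limit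
instance (para_list : List String) (limit : Int) (out : List String) : Decidable (Spec_merge_paras para_list limit out) := by unfold Spec_merge_paras; infer_instance

-- ===== CLAIM (what is proved, stated in full; the proofs are below) =====
def Claim_equal_merge_paras : Prop := ∀ (para_list : List String) (limit : Int), Dom_merge_paras para_list limit → Spec_merge_paras para_list limit (merge_paras para_list limit)

-- ===== LEMMAS AND PROOFS =====

theorem mpEndB_ge (L : List Int) (lim : Int) :
    ∀ fuel j s, j ≤ mpEndB L lim fuel j s := by
  intro fuel
  induction fuel with
  | zero => intro j s; exact Nat.le_refl j
  | succ fuel ih =>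
    intro j s
    show j ≤ if j < L.length ∧ s + L.getD j 0 < lim then
        mpEndB L lim fuel (j + 1) (s + L.getD j 0) else j
    split
    · exact Nat.le_of_succ_le (ih (j + 1) (s + L.getD j 0))
    · exact Nat.le_refl j

theorem mpEndB_gt (L : List Int) (lim : Int) (fuel i : Nat)
    (hi : i < L.length) (hl : 0 + L.getD i 0 < lim) : i < mpEndB L lim (fuel + 1) i 0 := by
  show i < if i < L.length ∧ 0 + L.getD i 0 < lim then
      mpEndB L lim fuel (i + 1) (0 + L.getD i 0) else i
  rw [if_pos ⟨hi, hl⟩]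
  exact mpEndB_ge L lim fuel (i + 1) (0 + L.getD i 0)

-- fuel does not matter as long as it covers the remaining indices
theorem mpEndB_fuel (L : List Int) (lim : Int) :
    ∀ f1 f2 j s, L.length - j ≤ f1 → L.length - j ≤ f2 →
      mpEndB L lim f1 j s = mpEndB L lim f2 j s := by
  intro f1
  induction f1 with
  | zero =>
    intro f2 j s h1 h2
    cases f2 with
    | zero => rfl
    | succ f2 =>
      show j = if j < L.length ∧ s + L.getD j 0 < lim then
          mpEndB L lim f2 (j + 1) (s + L.getD j 0) else j
      rw [if_neg (fun hc => absurd hc.1 (by omega))]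
  | succ f1 ih =>
    intro f2 j s h1 h2
    cases f2 with
    | zero =>
      show (if j < L.length ∧ s + L.getD j 0 < lim then
          mpEndB L lim f1 (j + 1) (s + L.getD j 0) else j) = j
      rw [if_neg (fun hc => absurd hc.1 (by omega))]
    | succ f2 =>
      show (if j < L.length ∧ s + L.getD j 0 < lim then
          mpEndB L lim f1 (j + 1) (s + L.getD j 0) else j) =
        (if j < L.length ∧ s + L.getD j 0 < lim then
          mpEndB L lim f2 (j + 1) (s + L.getD j 0) else j)
      split
      · next hc => exact ih f2 (j + 1) (s + L.getD j 0) (by omega) (by omega)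
      · rfl

-- glue ps = the characters A's inner loop appends for the group ps (each paragraph followed by one space)
def mpGlue (ps : List String) : List Char := (ps.map (fun p => p.toList ++ [' '])).flatten

theorem mpGlue_cons (p : String) (ps : List String) :
    mpGlue (p :: ps) = p.toList ++ [' '] ++ mpGlue ps := by
  simp [mpGlue]

-- glue is join-with-space plus one trailing space (nonempty case)
theorem mpGlue_eq_join (ps : List String) (h : ps ≠ []) :
    mpGlue ps = PySem.Chars.join [' '] (ps.map String.toList) ++ [' '] := by
  induction ps with
  | nil => simp at h
  | cons p ps ih =>
    cases ps with
    | nil => simp [mpGlue, PySem.Chars.join_singleton]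
    | cons q rest =>
      rw [mpGlue_cons, ih (by simp)]
      simp only [List.map_cons]
      rw [PySem.Chars.join_cons_cons]
      simp

theorem lstrip_append (x y : List Char) :
    PySem.Chars.lstrip (x ++ y) =
      if PySem.Chars.lstrip x = [] then PySem.Chars.lstrip y
      else PySem.Chars.lstrip x ++ y := by
  induction x with
  | nil => simp [PySem.Chars.lstrip]
  | cons c x ih =>
    by_cases hc : PySem.Chars.isspace c
    · simpa [PySem.Chars.lstrip, hc] using ih
    · simp [PySem.Chars.lstrip, hc]

theorem rstrip_append_space (x : List Char) :
    PySem.Chars.rstrip (x ++ [' ']) = PySem.Chars.rstrip x := by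
  have h : PySem.Chars.isspace ' ' = true := by decide
  simp [PySem.Chars.rstrip, h]

theorem strip_append_space (x : List Char) :
    PySem.Chars.strip (x ++ [' ']) = PySem.Chars.strip x := by
  unfold PySem.Chars.strip
  rw [lstrip_append]
  split
  · next h =>
    have h2 : PySem.Chars.lstrip [' '] = [] := by decide
    rw [h, h2]
  · exact rstrip_append_space _

-- A's inner loop computes B's group end and appends glue of that slice of paragraphs.
theorem inner_eq (P : List String) (L : List Int) (lim : Int) (hPL : P.length = L.length) :
    ∀ fI fE j s temp, L.length - j ≤ fI → L.length - j ≤ fE → j < L.length → s + L.getD j 0 < lim →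
      mpInnerA P L lim fI j (s + L.getD j 0) temp =
        (mpEndB L lim fE j s, temp ++ mpGlue ((P.drop j).take (mpEndB L lim fE j s - j))) := by
  intro fI
  induction fI with
  | zero => intro fE j s temp h1 h2 hj _; omega
  | succ fI ih =>
    intro fE j s temp h1 h2 hj hs
    cases fE with
    | zero => omega
    | succ fE =>
    show (if j < L.length ∧ s + L.getD j 0 < lim then
        let temp' := temp ++ (P.getD j "").toList ++ [' ']
        if j + 1 = L.length then (j + 1, temp')
        else mpInnerA P L lim fI (j + 1) ((s + L.getD j 0) + L.getD (j + 1) 0) temp'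
      else (j, temp)) = _
    rw [if_pos (⟨hj, hs⟩ : j < L.length ∧ s + L.getD j 0 < lim)]
    have hstep : mpEndB L lim (fE + 1) j s = mpEndB L lim fE (j + 1) (s + L.getD j 0) := by
      show (if j < L.length ∧ s + L.getD j 0 < lim then
          mpEndB L lim fE (j + 1) (s + L.getD j 0) else j) = _
      rw [if_pos (⟨hj, hs⟩ : j < L.length ∧ s + L.getD j 0 < lim)]
    have hdrop : (P.drop j) = P.getD j "" :: P.drop (j + 1) := by
      rw [List.drop_eq_getElem_cons (show j < P.length by omega)]
      congr 1
      rw [List.getD_eq_getElem?_getD, List.getElem?_eq_getElem (show j < P.length by omega)]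
      rfl
    by_cases hend : j + 1 = L.length
    · -- Python's 'if pointer_two == len(lengths): break'
      rw [if_pos hend]
      have hE : mpEndB L lim (fE + 1) j s = j + 1 := by
        rw [hstep]
        rw [mpEndB_fuel L lim fE 0 (j + 1) (s + L.getD j 0) (by omega) (by omega)]
        rfl
      rw [hE]
      have h1' : (P.drop j).take (j + 1 - j) = [P.getD j ""] := by rw [hdrop]; simp
      rw [h1', mpGlue_cons]
      simp [mpGlue]
    · rw [if_neg hend]
      by_cases hnext : (s + L.getD j 0) + L.getD (j + 1) 0 < lim
      · rw [ih fE (j + 1) (s + L.getD j 0) _ (by omega) (by omega) (by omega) hnext, ← hstep]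
        have hge : j + 1 ≤ mpEndB L lim (fE + 1) j s :=
          hstep ▸ mpEndB_ge L lim fE (j + 1) (s + L.getD j 0)
        have hsplit : (P.drop j).take (mpEndB L lim (fE + 1) j s - j) =
            P.getD j "" :: (P.drop (j + 1)).take (mpEndB L lim (fE + 1) j s - (j + 1)) := by
          rw [hdrop, show mpEndB L lim (fE + 1) j s - j =
            (mpEndB L lim (fE + 1) j s - (j + 1)) + 1 by omega, List.take_succ_cons]
        rw [hsplit, mpGlue_cons]
        simp
      · -- next total fails the while test: both loops stop at j + 1
        cases fI with
        | zero => omega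
        | succ fI =>
          show (if j + 1 < L.length ∧ (s + L.getD j 0) + L.getD (j + 1) 0 < lim then
              let temp' := (temp ++ (P.getD j "").toList ++ [' ']) ++ (P.getD (j+1) "").toList ++ [' ']
              if j + 1 + 1 = L.length then (j + 1 + 1, temp')
              else mpInnerA P L lim fI (j + 1 + 1)
                (((s + L.getD j 0) + L.getD (j + 1) 0) + L.getD (j + 1 + 1) 0) temp'
            else (j + 1, temp ++ (P.getD j "").toList ++ [' '])) = _
          rw [if_neg (fun hc => absurd hc.2 hnext)]
          have hE : mpEndB L lim (fE + 1) j s = j + 1 := by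
            rw [hstep]
            cases fE with
            | zero => omega
            | succ fE =>
              show (if j + 1 < L.length ∧ (s + L.getD j 0) + L.getD (j + 1) 0 < lim then
                  mpEndB L lim fE (j + 1 + 1) ((s + L.getD j 0) + L.getD (j + 1) 0)
                else j + 1) = j + 1
              rw [if_neg (fun hc => absurd hc.2 hnext)]
          rw [hE]
          have h1' : (P.drop j).take (j + 1 - j) = [P.getD j ""] := by rw [hdrop]; simp
          rw [h1', mpGlue_cons]
          simp [mpGlue]

-- A's rendered merged group equals B's: strip of glue = strip of the space-join of the slice.
theorem render_merged (P : List String) (i e : Nat) (hi : i < P.length) (hie : i < e) :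
    String.ofList (PySem.Chars.strip (mpGlue ((P.drop i).take (e - i)))) =
      mpRenderB P (i, e, true) := by
  have hne : (P.drop i).take (e - i) ≠ [] := by
    simp [List.take_eq_nil_iff]
    omega
  unfold mpRenderB
  rw [mpGlue_eq_join _ hne, strip_append_space]
  have hslice : PySem.List.slice P (some (i : Int)) (some (e : Int)) =
      (P.drop i).take (e - i) := PySem.List.slice_natCast P i e
  rw [hslice]
  have hh : (PySem.Str.strip (PySem.Str.join " " ((P.drop i).take (e - i)))).toList =
      PySem.Chars.strip (PySem.Chars.join [' '] (((P.drop i).take (e - i)).map String.toList)) := by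
    rw [PySem.Str.toList_strip, PySem.Str.toList_join]
    rfl
  rw [← hh, String.ofList_toList]
  simp

-- A's outer loop emits exactly B's rendered groups.
theorem outer_eq (P : List String) (L : List Int) (lim : Int) (hPL : P.length = L.length) :
    ∀ fO fG i acc, L.length - i ≤ fO → L.length - i ≤ fG →
      mpOuterA P L lim fO i acc = acc ++ (mpGroupsB L lim fG i).map (mpRenderB P) := by
  intro fO
  induction fO with
  | zero =>
    intro fG i acc h1 h2
    show acc = acc ++ (mpGroupsB L lim fG i).map (mpRenderB P)
    cases fG with
    | zero => simp [mpGroupsB]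
    | succ fG =>
      show acc = acc ++ (List.map (mpRenderB P) (if i < L.length then _ else []))
      rw [if_neg (by omega)]
      simp
  | succ fO ih =>
    intro fG i acc h1 h2
    by_cases hi : i < L.length
    · cases fG with
      | zero => omega
      | succ fG =>
      show (if i < L.length then
          if L.getD i 0 < lim then
            mpOuterA P L lim fO (mpInnerA P L lim L.length i (L.getD i 0) []).1
              (acc ++ [String.ofList (PySem.Chars.strip (mpInnerA P L lim L.length i (L.getD i 0) []).2)])
          else mpOuterA P L lim fO (i + 1) (acc ++ [P.getD i ""])
        else acc) = acc ++ (List.map (mpRenderB P)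
          (if i < L.length then
            if L.getD i 0 < lim then
              (i, mpEndB L lim L.length i 0, true) :: mpGroupsB L lim fG (mpEndB L lim L.length i 0)
            else (i, i + 1, false) :: mpGroupsB L lim fG (i + 1)
          else []))
      rw [if_pos hi, if_pos hi]
      by_cases hl : L.getD i 0 < lim
      · rw [if_pos hl, if_pos hl]
        have hlen : 1 ≤ L.length := by omega
        have hinner := inner_eq P L lim hPL L.length L.length i 0 [] (by omega) (by omega) hi
          (by simpa using hl)
        rw [show (0 : Int) + L.getD i 0 = L.getD i 0 by omega] at hinner
        rw [hinner]
        have hgt : i < mpEndB L lim L.length i 0 := by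
          have := mpEndB_gt L lim (L.length - 1) i hi (by simpa using hl)
          rwa [show L.length - 1 + 1 = L.length by omega] at this
        rw [ih fG (mpEndB L lim L.length i 0) _ (by omega) (by omega)]
        rw [List.map_cons, ← render_merged P i (mpEndB L lim L.length i 0) (by omega) hgt]
        simp
      · rw [if_neg hl, if_neg hl]
        rw [ih fG (i + 1) _ (by omega) (by omega)]
        have hr : mpRenderB P (i, i + 1, false) = P.getD i "" := rfl
        rw [List.map_cons, hr]
        simp
    · cases fG with
      | zero =>
        show (if i < L.length then _ else acc) = acc ++ (mpGroupsB L lim 0 i).map (mpRenderB P)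
        rw [if_neg hi]
        simp [mpGroupsB]
      | succ fG =>
        show (if i < L.length then _ else acc) =
          acc ++ (List.map (mpRenderB P) (if i < L.length then _ else []))
        rw [if_neg hi, if_neg hi]
        simp

-- ===== VERDICT (by name: the statement is the Claim_ definition above) =====
theorem merge_paras_spec : Claim_equal_merge_paras := by
  intro para_list limit _
  show merge_paras para_list limit = merge_paras_alt para_list limit
  have h := outer_eq para_list
    (para_list.map (fun para => ((PySem.Chars.splitOn para.toList [' ']).length : Int)))
    limit (by simp)
    (para_list.map (fun para => ((PySem.Chars.splitOn para.toList [' ']).length : Int))).length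
    (para_list.map (fun para => ((PySem.Chars.splitOn para.toList [' ']).length : Int))).length
    0 [] (by omega) (by omega)
  simpa [merge_paras, merge_paras_alt] using h
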